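-- pv_equiv track=rewrite | github.com/miguelamica/informatica-gral | practica parcial 2 act 1 ej 1--.py | numVocC
-- ===== SOURCE A (Python) =====
-- def numVocC(pal):
--     i=0
--     x=0
--     while i<len(pal):
--         if pal[i] ==  "I" or pal[i] == "i" or pal[i] == "U" or pal[i] == "u":
--             x+=1
--             i+=1
--         else:
--             i+=1
--     return x
-- ===== SOURCE B (Python) =====
-- from collections import Counter
--
--
-- def numVocC(pal):
--     freq = Counter(pal.lower())
--     return freq["i"] + freq["u"]
-- ===== Notes on version B (the rewrite author's own statement) =====
-- stated objective: idiomatic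
-- what changed: Replaces A's per-character branching index loop with a collections.Counter frequency table of the lowercased string followed by two constant-time lookups (freq['i'] + freq['u']).
import Mathlib
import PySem

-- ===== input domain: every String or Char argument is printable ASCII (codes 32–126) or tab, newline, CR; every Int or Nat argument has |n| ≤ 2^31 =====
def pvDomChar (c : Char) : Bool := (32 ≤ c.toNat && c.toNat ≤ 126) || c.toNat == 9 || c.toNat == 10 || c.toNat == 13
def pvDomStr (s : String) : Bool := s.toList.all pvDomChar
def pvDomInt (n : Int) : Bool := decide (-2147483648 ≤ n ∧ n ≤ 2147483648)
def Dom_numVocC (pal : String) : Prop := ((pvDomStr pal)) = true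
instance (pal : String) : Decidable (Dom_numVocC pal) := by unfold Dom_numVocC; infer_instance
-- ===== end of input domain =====

-- B replaces A's per-character branching index loop with a Counter frequency table of the
-- lowercased string plus two lookups (idiomatic; same O(n) cost).

-- ===== PORT A =====
-- while i < len(pal): if pal[i] in "IiUu": x += 1; i += 1 else: i += 1
def numVocCLoop (pal : List Char) (i : Nat) (x : Int) : Int :=
  if _h : i < pal.length then
    if pal[i] == 'I' || pal[i] == 'i' || pal[i] == 'U' || pal[i] == 'u' then
      numVocCLoop pal (i + 1) (x + 1)
    else
      numVocCLoop pal (i + 1) x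
  else x
termination_by pal.length - i

def numVocC (pal : String) : Int := numVocCLoop pal.toList 0 0

-- ===== PORT B =====
-- freq = Counter(pal.lower()); return freq["i"] + freq["u"]
def numVocC_alt (pal : String) : Int :=
  let freq := PySem.Dict.counter (PySem.Str.lower pal).toList
  freq.getD 'i' 0 + freq.getD 'u' 0

-- ===== PRECONDITION & SPEC =====
def Spec_numVocC (pal : String) (out : Int) : Prop := out = numVocC_alt pal
instance (pal : String) (out : Int) : Decidable (Spec_numVocC pal out) := by unfold Spec_numVocC; infer_instance

-- ===== CLAIM (what is proved, stated in full; the proofs are below) =====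
def Claim_equal_numVocC : Prop := ∀ (pal : String), Dom_numVocC pal → Spec_numVocC pal (numVocC pal)

-- ===== LEMMAS AND PROOFS =====

-- the test A's loop applies to each character
def pvIU (c : Char) : Bool := c == 'I' || c == 'i' || c == 'U' || c == 'u'

theorem charToNat_inj (a b : Char) : a.toNat = b.toNat ↔ a = b := by
  constructor
  · intro h; exact Char.ext (UInt32.toNat_inj.mp h)
  · intro h; rw [h]

theorem numVocCLoop_eq (pal : List Char) (i : Nat) (x : Int) :
    numVocCLoop pal i x = x + ((pal.drop i).countP pvIU : Int) := by
  fun_induction numVocCLoop pal i x with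
  | case1 i x h hc ih =>
    rw [ih, List.drop_eq_getElem_cons h, List.countP_cons]
    simp [pvIU, hc]; ring
  | case2 i x h hc ih =>
    rw [ih, List.drop_eq_getElem_cons h, List.countP_cons]
    simp [pvIU, hc]
  | case3 i x h =>
    have : pal.drop i = [] := List.drop_eq_nil_of_le (by omega)
    simp [this]

theorem lowerChar_toNat (c : Char) :
    (PySem.Chars.lowerChar c).toNat =
      if 65 ≤ c.toNat ∧ c.toNat ≤ 90 then c.toNat + 32 else c.toNat := by
  unfold PySem.Chars.lowerChar PySem.Chars.isupper
  have e1 : ('A' ≤ c) ↔ 65 ≤ c.toNat := by rw [Char.le_def]; exact UInt32.le_iff_toNat_le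
  have e2 : (c ≤ 'Z') ↔ c.toNat ≤ 90 := by rw [Char.le_def]; exact UInt32.le_iff_toNat_le
  by_cases h : 65 ≤ c.toNat ∧ c.toNat ≤ 90
  · rw [if_pos h]
    have hb : (decide ('A' ≤ c) && decide (c ≤ 'Z')) = true := by
      simp only [Bool.and_eq_true, decide_eq_true_eq]
      exact ⟨e1.mpr h.1, e2.mpr h.2⟩
    rw [if_pos hb, Char.toNat_ofNat, if_pos (Or.inl (by omega))]
  · rw [if_neg h]
    have hb : ¬ ((decide ('A' ≤ c) && decide (c ≤ 'Z')) = true) := by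
      simp only [Bool.and_eq_true, decide_eq_true_eq]
      intro hc
      exact h ⟨e1.mp hc.1, e2.mp hc.2⟩
    rw [if_neg hb]

theorem lowerChar_i (c : Char) :
    (PySem.Chars.lowerChar c == 'i') = (c == 'I' || c == 'i') := by
  rw [Bool.eq_iff_iff]
  simp only [beq_iff_eq, Bool.or_eq_true, ← charToNat_inj]
  rw [lowerChar_toNat]
  show (if 65 ≤ c.toNat ∧ c.toNat ≤ 90 then c.toNat + 32 else c.toNat) = 105
      ↔ (c.toNat = 73 ∨ c.toNat = 105)
  split_ifs with h <;> omega

theorem lowerChar_u (c : Char) :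
    (PySem.Chars.lowerChar c == 'u') = (c == 'U' || c == 'u') := by
  rw [Bool.eq_iff_iff]
  simp only [beq_iff_eq, Bool.or_eq_true, ← charToNat_inj]
  rw [lowerChar_toNat]
  show (if 65 ≤ c.toNat ∧ c.toNat ≤ 90 then c.toNat + 32 else c.toNat) = 117
      ↔ (c.toNat = 85 ∨ c.toNat = 117)
  split_ifs with h <;> omega

theorem count_lower_split (l : List Char) :
    ((PySem.Chars.lower l).count 'i' + (PySem.Chars.lower l).count 'u' : Int)
      = (l.countP pvIU : Int) := by
  induction l with
  | nil => simp [PySem.Chars.lower]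
  | cons c t ih =>
    have hl : PySem.Chars.lower (c :: t) = PySem.Chars.lowerChar c :: PySem.Chars.lower t := by
      simp [PySem.Chars.lower]
    have key : ((if (c == 'I' || c == 'i') then (1 : Int) else 0)
        + (if (c == 'U' || c == 'u') then (1 : Int) else 0))
        = (if pvIU c then (1 : Int) else 0) := by
      unfold pvIU
      by_cases hI : c = 'I' <;> by_cases hi : c = 'i' <;>
        by_cases hU : c = 'U' <;> by_cases hu : c = 'u' <;>
        simp_all
    rw [hl, List.count_cons, List.count_cons, List.countP_cons]
    push_cast
    rw [← ih, lowerChar_i, lowerChar_u]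
    rw [← key]
    ring

-- ===== VERDICT (by name: the statement is the Claim_ definition above) =====
theorem numVocC_spec : Claim_equal_numVocC := by
  intro pal _
  unfold Spec_numVocC numVocC numVocC_alt
  rw [numVocCLoop_eq]
  simp only [PySem.Dict.getD_counter, PySem.Str.toList_lower, List.drop_zero]
  rw [← count_lower_split]
  ring
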